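-- pv_equiv track=rewrite | github.com/MWassim1/Projet-jeu-deux-joueurs | Awele/awele.py | listeCoupsValides
-- ===== SOURCE A (Python) =====
-- def listeCoupsValides(jeu) :
--     listCoups = []
--     plateau = jeu[0]
--     for i in range (0,len(plateau)) :
--         for j in range (0,len(plateau[i])):
--             if(estValide(jeu,[i,j]) and (jeu[1]-1 == i)):
--                 listCoups.append([i,j])
--     return listCoups
--
-- def estValide(jeu,coup):
--     plateau=jeu[0]
--     if (coup[0]==0):
--         return plateau[coup[0]][coup[1]] > coup[1]
--     if (coup[0] == 1) :
--         return (plateau[coup[0]][coup[1]] > (5-coup[1]))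
-- ===== SOURCE B (Python) =====
-- def listeCoupsValides(jeu):
--     plateau = jeu[0]
--     row = jeu[1] - 1
--     if row == 0 and len(plateau) > 0:
--         return [[0, j] for j in range(len(plateau[0])) if plateau[0][j] > j]
--     if row == 1 and len(plateau) > 1:
--         return [[1, j] for j in range(len(plateau[1])) if plateau[1][j] > 5 - j]
--     return []
-- ===== Notes on version B (the rewrite author's own statement) =====
-- stated objective: faster
-- what changed: B replaces the nested scan over every cell of the board (with a per-cell row-match test and the estValide helper inlined away) by a single direct pass over the one row jeu[1]-1 can designate, returning [] outright when that row is not 0 or 1 or not on the board.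
import Mathlib
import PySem

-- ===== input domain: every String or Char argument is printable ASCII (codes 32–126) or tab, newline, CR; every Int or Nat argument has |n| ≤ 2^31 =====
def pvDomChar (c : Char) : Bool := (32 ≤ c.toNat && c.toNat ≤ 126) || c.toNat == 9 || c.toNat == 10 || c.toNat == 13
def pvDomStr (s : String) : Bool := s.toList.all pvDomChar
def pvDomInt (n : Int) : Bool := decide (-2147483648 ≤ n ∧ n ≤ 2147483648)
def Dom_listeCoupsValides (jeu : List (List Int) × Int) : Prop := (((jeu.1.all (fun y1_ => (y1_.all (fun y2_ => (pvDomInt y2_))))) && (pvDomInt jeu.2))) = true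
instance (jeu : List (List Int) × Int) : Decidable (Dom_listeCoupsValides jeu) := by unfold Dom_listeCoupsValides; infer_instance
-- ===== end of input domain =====

-- B replaces A's nested scan over every cell (with per-cell row-match test) by one
-- direct pass over the single row jeu.2-1 can designate; objective: simpler.

-- ===== PORT A =====
-- estValide(jeu,[i,j]): indices come from A's loops, always in range, so getD is exact;
-- the implicit 'return None' on rows ≠ 0,1 is Option.none.
def estValide (jeu : List (List Int) × Int) (i j : Nat) : Option Bool :=
  let plateau := jeu.1
  if (i : Int) = 0 then some (decide ((plateau.getD i []).getD j 0 > (j : Int)))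
  else if (i : Int) = 1 then some (decide ((plateau.getD i []).getD j 0 > 5 - (j : Int)))
  else none

def listeCoupsValides (jeu : List (List Int) × Int) : List (List Int) :=
  let plateau := jeu.1
  (List.range plateau.length).foldl (fun listCoups i =>
    (List.range (plateau.getD i []).length).foldl (fun lc j =>
      if ((estValide jeu i j).getD false && decide (jeu.2 - 1 = (i : Int))) = true then
        lc ++ [[(i : Int), (j : Int)]]
      else lc) listCoups) []

-- ===== PORT B =====
def listeCoupsValides_alt (jeu : List (List Int) × Int) : List (List Int) :=
  let plateau := jeu.1
  let row := jeu.2 - 1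
  if row = 0 ∧ plateau.length > 0 then
    (List.range (plateau.getD 0 []).length).filterMap (fun j =>
      if (plateau.getD 0 []).getD j 0 > (j : Int) then some [0, (j : Int)] else none)
  else if row = 1 ∧ plateau.length > 1 then
    (List.range (plateau.getD 1 []).length).filterMap (fun j =>
      if (plateau.getD 1 []).getD j 0 > 5 - (j : Int) then some [1, (j : Int)] else none)
  else []

-- ===== PRECONDITION & SPEC =====
def Spec_listeCoupsValides (jeu : List (List Int) × Int) (out : List (List Int)) : Prop := out = listeCoupsValides_alt jeu
instance (jeu : List (List Int) × Int) (out : List (List Int)) : Decidable (Spec_listeCoupsValides jeu out) := by unfold Spec_listeCoupsValides; infer_instance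

-- ===== CLAIM (what is proved, stated in full; the proofs are below) =====
def Claim_equal_listeCoupsValides : Prop := ∀ (jeu : List (List Int) × Int), Dom_listeCoupsValides jeu → Spec_listeCoupsValides jeu (listeCoupsValides jeu)

-- ===== LEMMAS AND PROOFS =====

theorem pv_foldl_id {α β : Type} (f : β → α → β) (l : List α) (acc : β)
    (hid : ∀ a x, x ∈ l → f a x = a) : l.foldl f acc = acc := by
  induction l generalizing acc with
  | nil => rfl
  | cons x xs ih =>
    simp only [List.foldl_cons]
    rw [hid acc x (by simp)]
    exact ih acc fun a y hy => hid a y (by simp [hy])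

theorem pv_foldl_range_single {β : Type} (f : β → Nat → β) (n k : Nat) (hk : k < n)
    (hid : ∀ a i, i ≠ k → f a i = a) (acc : β) :
    (List.range n).foldl f acc = f acc k := by
  induction n generalizing acc with
  | zero => omega
  | succ m ih =>
    rw [List.range_succ, List.foldl_append]
    by_cases hkm : k = m
    · subst hkm
      rw [pv_foldl_id f _ acc (fun a i hi => hid a i (by simp at hi; omega))]
      rfl
    · rw [ih (by omega) acc]
      simp only [List.foldl_cons, List.foldl_nil]
      exact hid _ m (by omega)

theorem pv_foldl_append_if {α : Type} (p : Nat → Bool) (g : Nat → α) (m : Nat) (acc : List α) :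
    (List.range m).foldl (fun lc j => if p j = true then lc ++ [g j] else lc) acc
      = acc ++ (List.range m).filterMap (fun j => if p j = true then some (g j) else none) := by
  induction m generalizing acc with
  | zero => simp
  | succ n ih =>
    rw [List.range_succ, List.foldl_append, List.filterMap_append, ih]
    by_cases hp : p n = true <;> simp [hp]

-- ===== VERDICT (by name: the statement is the Claim_ definition above) =====
theorem listeCoupsValides_spec : Claim_equal_listeCoupsValides := by
  intro jeu _
  unfold Spec_listeCoupsValides listeCoupsValides listeCoupsValides_alt
  obtain ⟨plateau, p⟩ := jeu
  simp only
  by_cases h0 : p - 1 = 0 ∧ plateau.length > 0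
  · rw [if_pos h0]
    rw [pv_foldl_range_single _ _ 0 h0.2
      (fun a i hi => by
        have : ¬ (p - 1 = (i : Int)) := by
          intro he; apply hi; omega
        simp [this])]
    rw [pv_foldl_append_if
      (fun j => (estValide (plateau, p) 0 j).getD false && decide (p - 1 = ((0 : Nat) : Int)))
      (fun j => [((0 : Nat) : Int), (j : Int)])]
    simp [estValide, h0.1]
  · rw [if_neg h0]
    by_cases h1 : p - 1 = 1 ∧ plateau.length > 1
    · rw [if_pos h1]
      rw [pv_foldl_range_single _ _ 1 h1.2
        (fun a i hi => by
          have : ¬ (p - 1 = (i : Int)) := by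
            intro he; apply hi; omega
          simp [this])]
      rw [pv_foldl_append_if
        (fun j => (estValide (plateau, p) 1 j).getD false && decide (p - 1 = ((1 : Nat) : Int)))
        (fun j => [((1 : Nat) : Int), (j : Int)])]
      simp [estValide, h1.1]
    · rw [if_neg h1]
      apply pv_foldl_id
      intro a i hi
      simp only [List.mem_range] at hi
      by_cases hrow : p - 1 = (i : Int)
      · have hi0 : i ≠ 0 := by
          intro h; subst h; exact h0 ⟨by omega, hi⟩
        have hi1 : i ≠ 1 := by
          intro h; subst h; exact h1 ⟨by omega, hi⟩
        apply pv_foldl_id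
        intro b j _
        simp [estValide, hi0, hi1]
      · simp [hrow]
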